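-- pv_equiv track=rewrite | github.com/dmironov1993/codeforces | 807A-IsItRated.py | IsItRated
-- ===== SOURCE A (Python) =====
-- def IsItRated(a,b):
--     arr = sum([i-j for i,j in zip(a,b)])
--     sorted_b = sorted(b, reverse=True)
--     if a != b:
--         return 'rated'
--     else:
--         if b != sorted_b:
--             return 'unrated'
--         else:
--             return 'maybe'
-- ===== SOURCE B (Python) =====
-- def IsItRated(a, b):
--     # Linear adjacent scan instead of sorting b: O(n) vs O(n log n).
--     if a != b:
--         return 'rated'
--     if any(x < y for x, y in zip(b, b[1:])):
--         return 'unrated'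
--     return 'maybe'
-- ===== Notes on version B (the rewrite author's own statement) =====
-- stated objective: faster
-- what changed: Replaces sorting b (and an unused sum of pairwise differences) with a single linear scan of adjacent pairs to decide whether b is non-increasing.
import Mathlib
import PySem

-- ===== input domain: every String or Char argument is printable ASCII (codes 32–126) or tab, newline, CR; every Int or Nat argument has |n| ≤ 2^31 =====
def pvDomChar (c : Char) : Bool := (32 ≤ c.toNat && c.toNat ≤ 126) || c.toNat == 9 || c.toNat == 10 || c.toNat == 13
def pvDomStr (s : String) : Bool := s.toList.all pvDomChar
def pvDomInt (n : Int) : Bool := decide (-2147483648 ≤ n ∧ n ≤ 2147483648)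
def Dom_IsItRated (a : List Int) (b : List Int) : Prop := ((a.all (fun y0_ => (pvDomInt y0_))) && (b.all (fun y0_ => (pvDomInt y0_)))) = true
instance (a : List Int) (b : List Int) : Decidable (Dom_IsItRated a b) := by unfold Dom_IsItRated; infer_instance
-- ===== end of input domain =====

-- B replaces sorting b (and an unused sum of pairwise differences) with one linear
-- scan of adjacent pairs to decide non-increasingness; objective: faster (O(n) vs O(n log n)).


-- ===== PORT A =====
def IsItRated (a : List Int) (b : List Int) : String :=
  let _arr : Int := ((a.zip b).map (fun p => p.1 - p.2)).sum   -- sum([i-j for i,j in zip(a,b)]), unused in A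
  let sorted_b := PySem.List.sorted b (fun x => x) true
  if a ≠ b then "rated"
  else if b ≠ sorted_b then "unrated"
  else "maybe"

-- ===== PORT B =====
def IsItRated_alt (a : List Int) (b : List Int) : String :=
  if a ≠ b then "rated"
  else if (b.zip b.tail).any (fun p => decide (p.1 < p.2)) then "unrated"
  else "maybe"

-- ===== PRECONDITION & SPEC =====
def Spec_IsItRated (a : List Int) (b : List Int) (out : String) : Prop := out = IsItRated_alt a b
instance (a : List Int) (b : List Int) (out : String) : Decidable (Spec_IsItRated a b out) := by unfold Spec_IsItRated; infer_instance

-- ===== CLAIM (what is proved, stated in full; the proofs are below) =====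
def Claim_equal_IsItRated : Prop := ∀ (a : List Int) (b : List Int), Dom_IsItRated a b → Spec_IsItRated a b (IsItRated a b)

-- ===== LEMMAS AND PROOFS =====

-- the adjacent-pair scan decides pairwise non-increasingness
theorem any_zip_tail_eq_false_iff (b : List Int) :
    ((b.zip b.tail).any (fun p => decide (p.1 < p.2)) = false) ↔ b.Pairwise (fun x y => y ≤ x) := by
  haveI : Trans (fun x y : Int => y ≤ x) (fun x y : Int => y ≤ x) (fun x y : Int => y ≤ x) :=
    ⟨fun h1 h2 => le_trans h2 h1⟩
  rw [← List.isChain_iff_pairwise]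
  induction b with
  | nil => simp
  | cons x t ih =>
    cases t with
    | nil => simp
    | cons y t' =>
      simp only [List.tail_cons, List.zip_cons_cons, List.any_cons, List.isChain_cons_cons,
        Bool.or_eq_false_iff, decide_eq_false_iff_not, not_lt] at *
      exact and_congr Iff.rfl ih

theorem sorted_rev_self_iff (b : List Int) :
    b = PySem.List.sorted b (fun x => x) true ↔ b.Pairwise (fun x y => y ≤ x) := by
  constructor
  · intro h
    have hp := PySem.List.sorted_pairwise_rev (xs := b) (key := fun x => x)
    rw [← h] at hp
    exact hp
  · intro hp
    exact (PySem.List.sorted_rev_eq_self_of_pairwise (xs := b) (key := fun x => x) hp).symm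

-- ===== VERDICT (by name: the statement is the Claim_ definition above) =====
theorem IsItRated_spec : Claim_equal_IsItRated := by
  intro a b _
  unfold Spec_IsItRated IsItRated IsItRated_alt
  by_cases hab : a = b
  · simp only [hab, ne_eq, not_true_eq_false, if_false]
    by_cases hs : b = PySem.List.sorted b (fun x => x) true
    · have hany := (any_zip_tail_eq_false_iff b).mpr ((sorted_rev_self_iff b).mp hs)
      rw [if_neg (by simpa using hs), if_neg (by simp [hany])]
    · have hnp : ¬ b.Pairwise (fun x y => y ≤ x) := fun hc => hs ((sorted_rev_self_iff b).mpr hc)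
      have hany : (b.zip b.tail).any (fun p => decide (p.1 < p.2)) = true := by
        by_contra h
        exact hnp ((any_zip_tail_eq_false_iff b).mp (by simpa using h))
      rw [if_pos (by simpa using hs), if_pos (by simp [hany])]
  · rw [if_pos hab, if_pos hab]
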